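-- pv_equiv track=rewrite | github.com/strogera/AoC2015 | Day 14/d14.py | winnerPoints
-- ===== SOURCE A (Python) =====
-- def calculateDistance(data, targetSec):
--     baseDistance = data[0] * data[1]
--     multiplier = targetSec // (data[1] + data[2])
--     reminder = targetSec % (data[1] + data[2])
--     if reminder >= data[1]:
--         return baseDistance * (multiplier + 1)
--     else:
--         return baseDistance * multiplier + data[0] * reminder
--
-- def winnerPoints(data, targetSec):
--     points = {}
--     for i in range(len(data)):
--         points[i] = 0
--
--     for i in range(1, targetSec+1):
--         distance = {}
--         for j in range(len(data)):
--             distance[j] = calculateDistance(data[j], i)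
--
--         reindeerDistPairsorted = [(k, v) for k, v in sorted(distance.items(), key=lambda item: item[1])]
--
--         top = reindeerDistPairsorted[-1]
--         k = -1
--         while k >= (-1) * len(reindeerDistPairsorted) and top[1] == (reindeerDistPairsorted[k])[1] :
--             points[reindeerDistPairsorted[k][0]] += 1
--             k -= 1
--
--     return [v for _, v in sorted(points.items(), key=lambda item: item[1])][-1]
-- ===== SOURCE B (Python) =====
-- def winnerPoints(data, targetSec):
--     # branch-free closed form: distance(t) = speed * (fly*(t//cycle) + min(t%cycle, fly))
--     def dist(row, t):
--         s, f, r = row[0], row[1], row[2]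
--         c = f + r
--         return s * (f * (t // c) + min(t % c, f))
--
--     points = [0] * len(data)
--     for t in range(1, targetSec + 1):
--         ds = [dist(row, t) for row in data]
--         m = max(ds)
--         points = [p + 1 if d == m else p for p, d in zip(points, ds)]
--     return max(points)
-- ===== Notes on version B (the rewrite author's own statement) =====
-- stated objective: simpler
-- what changed: B drops A's per-second dict/stable-sort/backwards while-walk and its branchy closed form: it keeps a plain list of points, computes each distance with a single branch-free formula speed*(fly*(t//cycle)+min(t%cycle,fly)), finds the leaders with one max scan, and returns max(points).
import Mathlib
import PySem

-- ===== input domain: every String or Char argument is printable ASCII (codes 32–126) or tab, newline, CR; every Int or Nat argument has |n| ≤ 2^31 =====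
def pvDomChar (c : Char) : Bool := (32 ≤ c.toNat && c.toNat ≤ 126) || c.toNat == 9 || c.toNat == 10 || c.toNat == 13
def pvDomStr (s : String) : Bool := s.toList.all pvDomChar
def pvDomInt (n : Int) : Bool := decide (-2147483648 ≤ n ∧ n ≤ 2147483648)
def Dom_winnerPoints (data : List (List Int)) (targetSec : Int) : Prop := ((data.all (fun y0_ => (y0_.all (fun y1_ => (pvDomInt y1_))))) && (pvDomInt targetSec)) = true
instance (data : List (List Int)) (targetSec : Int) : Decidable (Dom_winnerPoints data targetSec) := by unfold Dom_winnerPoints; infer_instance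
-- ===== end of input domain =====

-- B replaces A's per-second dict + stable sort by distance + backwards while-walk with a plain
-- list of per-reindeer points, a branch-free closed distance form and a single max scan (objective: simpler).

-- ===== PORT A =====
def pvCalcDistance (row : List Int) (t : Int) : Int :=
  let d0 := (PySem.List.pyGet? row 0).getD 0
  let d1 := (PySem.List.pyGet? row 1).getD 0
  let d2 := (PySem.List.pyGet? row 2).getD 0
  let baseDistance := d0 * d1
  let multiplier := PySem.Int.floordiv t (d1 + d2)
  let reminder := PySem.Int.mod t (d1 + d2)
  if reminder ≥ d1 then baseDistance * (multiplier + 1)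
  else baseDistance * multiplier + d0 * reminder

-- the 'while k >= -len(pairs) and top[1] == pairs[k][1]' loop, with fuel (pairs.length suffices)
def pvAwardLoop (pairs : List (Int × Int)) (topv : Int) (k : Int)
    (points : PySem.Dict Int Int) : Nat → PySem.Dict Int Int
  | 0 => points
  | fuel + 1 =>
    if k ≥ (-1) * (pairs.length : Int) then
      match PySem.List.pyGet? pairs k with
      | some p =>
        if topv = p.2 then
          pvAwardLoop pairs topv (k - 1) (points.modify p.1 0 (· + 1)) fuel
        else points
      | none => points
    else points

-- body of A's 'for i in range(1, targetSec+1)' loop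
def pvStepA (data : List (List Int)) (pts : PySem.Dict Int Int) (t : Int) : PySem.Dict Int Int :=
  let distance := (PySem.List.pyRange 0 (data.length : Int) 1).foldl
      (fun d j => d.insert j (pvCalcDistance ((PySem.List.pyGet? data j).getD []) t)) PySem.Dict.empty
  let pairs := PySem.List.sorted distance.items (fun p => p.2) false
  let top := (PySem.List.pyGet? pairs (-1)).getD (0, 0)
  pvAwardLoop pairs top.2 (-1) pts pairs.length

def winnerPoints (data : List (List Int)) (targetSec : Int) : Int :=
  let points0 := (PySem.List.pyRange 0 (data.length : Int) 1).foldl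
      (fun d i => d.insert i 0) PySem.Dict.empty
  let points := (PySem.List.pyRange 1 (targetSec + 1) 1).foldl (pvStepA data) points0
  let final := PySem.List.sorted points.items (fun p => p.2) false
  ((PySem.List.pyGet? (final.map (fun p => p.2)) (-1))).getD 0

-- ===== PORT B =====
def pvDist (row : List Int) (t : Int) : Int :=
  let s := (PySem.List.pyGet? row 0).getD 0
  let f := (PySem.List.pyGet? row 1).getD 0
  let r := (PySem.List.pyGet? row 2).getD 0
  let c := f + r
  s * (f * PySem.Int.floordiv t c + min (PySem.Int.mod t c) f)

-- body of B's 'for t in range(1, targetSec+1)' loop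
def pvStepB (data : List (List Int)) (pts : List Int) (t : Int) : List Int :=
  let ds := data.map (fun row => pvDist row t)
  let m := (PySem.List.max? ds (fun x => x)).getD 0
  List.zipWith (fun p d => if d = m then p + 1 else p) pts ds

def winnerPoints_alt (data : List (List Int)) (targetSec : Int) : Int :=
  let points := (PySem.List.pyRange 1 (targetSec + 1) 1).foldl (pvStepB data)
      (List.replicate data.length (0 : Int))
  (PySem.List.max? points (fun x => x)).getD 0

-- ===== PRECONDITION & SPEC =====
-- Pre_ excludes exactly the inputs where the Python A raises: empty data (IndexError on [-1]),
-- and, when the race loop runs at all, rows shorter than 3 (IndexError) or a zero fly+rest cycle (ZeroDivisionError).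
def Pre_winnerPoints (data : List (List Int)) (targetSec : Int) : Prop :=
  data ≠ [] ∧ (1 ≤ targetSec → ∀ row ∈ data, 3 ≤ row.length ∧ row.getD 1 0 + row.getD 2 0 ≠ 0)
instance (data : List (List Int)) (targetSec : Int) : Decidable (Pre_winnerPoints data targetSec) := by
  unfold Pre_winnerPoints; infer_instance

def pvWitness_winnerPoints : List (List Int) × Int := ([[14, 10, 127], [16, 11, 162]], 20)

def Spec_winnerPoints (data : List (List Int)) (targetSec : Int) (out : Int) : Prop := out = winnerPoints_alt data targetSec
instance (data : List (List Int)) (targetSec : Int) (out : Int) : Decidable (Spec_winnerPoints data targetSec out) := by unfold Spec_winnerPoints; infer_instance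

-- ===== CLAIM (what is proved, stated in full; the proofs are below) =====
def Claim_equal_winnerPoints : Prop := ∀ (data : List (List Int)) (targetSec : Int), Dom_winnerPoints data targetSec → Pre_winnerPoints data targetSec → Spec_winnerPoints data targetSec (winnerPoints data targetSec)

-- ===== LEMMAS AND PROOFS =====
theorem pvDist_eq_calc (row : List Int) (t : Int) : pvCalcDistance row t = pvDist row t := by
  unfold pvCalcDistance pvDist
  set d0 := (PySem.List.pyGet? row 0).getD 0
  set d1 := (PySem.List.pyGet? row 1).getD 0
  set q := PySem.Int.floordiv t (d1 + (PySem.List.pyGet? row 2).getD 0)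
  set r := PySem.Int.mod t (d1 + (PySem.List.pyGet? row 2).getD 0)
  simp only []
  split
  · rename_i h; rw [min_eq_right h]; ring
  · rename_i h; rw [min_eq_left (by omega)]; ring

-- A's distance dict has items = enumerate of B's distance list
theorem pv_dist_items (data : List (List Int)) (t : Int) :
    ((PySem.List.pyRange 0 (data.length : Int) 1).foldl
      (fun d j => d.insert j (pvCalcDistance ((PySem.List.pyGet? data j).getD []) t)) PySem.Dict.empty).items
    = PySem.List.enumerate (data.map (fun row => pvDist row t)) 0 := by
  rw [PySem.Dict.items_foldl_insert_fresh _ (fun a => a) _ _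
        (fun a _ => PySem.Dict.contains_empty a)
        (by simpa using PySem.List.nodup_pyRange_one 0 (data.length:Int))]
  rw [PySem.List.enumerate_eq_map_pyRange _ 0]
  show [] ++ _ = _
  rw [List.nil_append]
  have hlen : PySem.List.len (data.map (fun row => pvDist row t)) = (data.length : Int) := by
    simp [PySem.List.len]
  rw [hlen]
  apply List.map_congr_left
  intro j hj
  have hj' := (PySem.List.mem_pyRange_one).mp hj
  have hjn : j.toNat < data.length := by omega
  have h1 : PySem.List.pyGet? data j = some data[j.toNat] := by
    exact PySem.List.pyGet?_eq_some_getElem data (by omega) (by exact_mod_cast hj'.2)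
  have h2 : PySem.List.pyGetD (data.map (fun row => pvDist row t)) j 0 = pvDist data[j.toNat] t := by
    rw [PySem.List.pyGetD_eq_getElem _ 0 (by omega) (by simp; exact_mod_cast hj'.2)]
    simp
  rw [h1, h2]
  simp [pvDist_eq_calc]


theorem pvAwardLoop_eq (pairs : List (Int × Int)) (topv : Int) :
    ∀ (fuel : Nat) (i : Nat), pairs.length ≤ i + fuel → ∀ (pts : PySem.Dict Int Int),
    pvAwardLoop pairs topv (-(i : Int) - 1) pts fuel
      = ((pairs.reverse.drop i).takeWhile (fun p => decide (topv = p.2))).foldl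
          (fun d p => d.modify p.1 0 (· + 1)) pts := by
  intro fuel
  induction fuel with
  | zero =>
    intro i hi pts
    rw [List.drop_eq_nil_of_le (by simpa using hi)]
    rfl
  | succ fuel ih =>
    intro i hi pts
    by_cases hlt : i < pairs.length
    · have hget : PySem.List.pyGet? pairs (-(i : Int) - 1) = some pairs[pairs.length - (i+1)] := by
        have h1 : -(i : Int) - 1 = -((i+1 : Nat) : Int) := by push_cast; ring
        rw [h1, PySem.List.pyGet?_neg_natCast pairs (i+1) (by omega) (by omega)]
        simp
      have hdrop : pairs.reverse.drop i = pairs[pairs.length - (i+1)] :: pairs.reverse.drop (i+1) := by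
        rw [List.drop_eq_getElem_cons (by simpa using hlt)]
        congr 1
        rw [List.getElem_reverse]
        congr 1
        omega
      rw [hdrop]
      show pvAwardLoop pairs topv (-(i : Int) - 1) pts (fuel+1) = _
      rw [pvAwardLoop]
      rw [if_pos (by omega), hget]
      by_cases heq : topv = (pairs[pairs.length - (i+1)]).2
      · simp only [if_pos heq, List.takeWhile_cons, decide_eq_true heq]
        have h2 : -(i:Int) - 1 - 1 = -((i+1 : Nat) : Int) - 1 := by push_cast; ring
        rw [h2, ih (i+1) (by omega)]
        rfl
      · simp only [if_neg heq, List.takeWhile_cons, decide_eq_false heq]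
        rfl
    · rw [List.drop_eq_nil_of_le (by simpa using not_lt.mp hlt)]
      show pvAwardLoop pairs topv (-(i : Int) - 1) pts (fuel+1) = pts
      rw [pvAwardLoop, if_neg (by omega)]

theorem pv_last_sorted (xs : List (Int × Int)) (hne : xs ≠ []) :
    ∃ (L : Int × Int), (PySem.List.sorted xs (fun p => p.2) false).getLast? = some L ∧
      L ∈ xs ∧ ∀ p ∈ xs, p.2 ≤ L.2 := by
  set S := PySem.List.sorted xs (fun p => p.2) false with hS
  have hSne : S ≠ [] := by
    rw [hS]; intro h; exact hne ((PySem.List.sorted_eq_nil_iff _ _ _).mp h)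
  have hperm : S.Perm xs := PySem.List.sorted_perm _ _ _
  have hpw : S.Pairwise (fun a b => a.2 ≤ b.2) := PySem.List.sorted_pairwise _ _
  have hrpne : S.reverse ≠ [] := by simpa using hSne
  rcases hr : S.reverse with _ | ⟨a, t⟩
  · exact absurd hr hrpne
  have hrp : (S.reverse).Pairwise (fun a b => b.2 ≤ a.2) := by
    rw [List.pairwise_reverse]; exact hpw
  refine ⟨a, ?_, ?_, ?_⟩
  · rw [← List.head?_reverse, hr]; rfl
  · exact hperm.mem_iff.mp (by rw [← List.mem_reverse, hr]; exact List.mem_cons_self)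
  · intro p hp
    have hpS : p ∈ S.reverse := by rw [List.mem_reverse]; exact hperm.mem_iff.mpr hp
    rw [hr] at hpS
    rw [hr] at hrp
    rcases List.mem_cons.mp hpS with h | hpt
    · rw [h]
    · exact (List.pairwise_cons.mp hrp).1 p hpt

theorem pv_takeWhile_filter (m : Int) (rp : List (Int × Int))
    (hpw : rp.Pairwise (fun a b => b.2 ≤ a.2)) (hub : ∀ p ∈ rp, p.2 ≤ m) :
    rp.takeWhile (fun p => decide (m = p.2)) = rp.filter (fun p => decide (m = p.2)) := by
  induction rp with
  | nil => rfl
  | cons a t ih =>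
    rcases List.pairwise_cons.mp hpw with ⟨ha, ht⟩
    by_cases h : m = a.2
    · rw [List.takeWhile_cons, List.filter_cons, if_pos (by simp [h]), if_pos (by simp [h])]
      rw [ih ht (fun p hp => hub p (List.mem_cons_of_mem _ hp))]
    · rw [List.takeWhile_cons, List.filter_cons, if_neg (by simp [h]), if_neg (by simp [h])]
      rw [List.filter_eq_nil_iff.mpr]
      intro p hp
      have h1 : p.2 ≤ a.2 := ha p hp
      have h2 : a.2 ≤ m := hub a List.mem_cons_self
      simp only [decide_eq_true_eq]
      omega

theorem pv_step_items (data : List (List Int)) (hne : data ≠ []) (t : Int)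
    (pts : PySem.Dict Int Int) (l : List Int)
    (hrel : pts.items = PySem.List.enumerate l 0) (hlen : l.length = data.length) :
    (pvStepA data pts t).items = PySem.List.enumerate (pvStepB data l t) 0 := by
  set ds := data.map (fun row => pvDist row t) with hds
  have hdsne : ds ≠ [] := by simpa [hds] using hne
  have hdslen : ds.length = data.length := by simp [hds]
  obtain ⟨mx, hmx⟩ : ∃ mx, PySem.List.max? ds (fun x => x) = some mx := by
    rcases h : PySem.List.max? ds (fun x => x) with _ | mx
    · exact absurd ((PySem.List.max?_eq_none_iff _ _).mp h) hdsne
    · exact ⟨mx, rfl⟩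
  have hm_mem : mx ∈ ds := PySem.List.max?_mem hmx
  have hm_ub : ∀ y ∈ ds, y ≤ mx := by
    intro y hy; exact PySem.List.max?_isMax hmx y hy
  set E := PySem.List.enumerate ds 0 with hE
  have hEne : E ≠ [] := by
    rw [hE]
    intro h
    have hl0 : ds.length = 0 := by simpa using congrArg List.length h
    exact hdsne (List.length_eq_zero_iff.mp hl0)
  set pairs := PySem.List.sorted E (fun p => p.2) false with hpairs
  obtain ⟨L, hLget, hLmem, hLub⟩ := pv_last_sorted E hEne
  have hperm : pairs.Perm E := PySem.List.sorted_perm _ _ _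
  have hsndE : ∀ p ∈ E, p.2 ∈ ds := by
    intro p hp
    obtain ⟨k, hk, rfl⟩ := (PySem.List.mem_enumerate_iff _ _ _).mp hp
    exact List.getElem_mem hk
  have hLm : L.2 = mx := by
    apply le_antisymm (hm_ub _ (hsndE _ hLmem))
    obtain ⟨k, hk, hkv⟩ := List.mem_iff_getElem.mp hm_mem
    have hmE : ((0 + (k:Int)), mx) ∈ E := (PySem.List.mem_enumerate_iff ds 0 _).mpr ⟨k, hk, by rw [hkv]⟩
    exact hLub _ hmE
  -- unfold A's step and rewrite the distance dict
  simp only [pvStepA]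
  rw [pv_dist_items data t]
  rw [show ((-1 : Int)) = -((0:Nat) : Int) - 1 by norm_num]
  rw [pvAwardLoop_eq _ _ _ 0 (by omega) pts]
  rw [List.drop_zero]
  have htopv : ((PySem.List.pyGet? (PySem.List.sorted E (fun p => p.2) false) (-(((0:Nat)):Int) - 1)).getD (0,0)).2 = mx := by
    rw [show (-(((0:Nat)):Int) - 1) = (-1 : Int) by norm_num]
    rw [PySem.List.pyGet?_neg_one, ← hpairs]
    rw [show (PySem.List.sorted E (fun p => p.2) false) = pairs from hpairs.symm] at hLget
    rw [hLget]
    simpa using hLm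
  rw [← hpairs] at htopv ⊢
  rw [htopv]
  -- takeWhile = filter
  have hpwrev : pairs.reverse.Pairwise (fun a b => b.2 ≤ a.2) := by
    rw [List.pairwise_reverse]
    exact PySem.List.sorted_pairwise _ _
  have hubrev : ∀ p ∈ pairs.reverse, p.2 ≤ mx := by
    intro p hp
    exact hm_ub _ (hsndE _ (hperm.mem_iff.mp (List.mem_reverse.mp hp)))
  rw [pv_takeWhile_filter mx _ hpwrev hubrev]
  set sel := pairs.reverse.filter (fun p => decide (mx = p.2)) with hsel
  -- fold over keys only
  have hfold : sel.foldl (fun d p => d.modify p.1 0 (· + 1)) pts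
      = (sel.map (fun p => p.1)).foldl (fun d x => d.modify x 0 (· + 1)) pts := by
    rw [List.foldl_map]
  rw [hfold]
  set ks := sel.map (fun p => p.1) with hks
  -- keys facts
  have hkeys_pts : pts.keys = PySem.List.pyRange 0 (data.length : Int) 1 := by
    show pts.items.map (fun p => p.1) = _
    rw [hrel, PySem.List.map_fst_enumerate]
    rw [hlen]
    norm_num
  have hnodupK : pts.keys.Nodup := by
    rw [hkeys_pts]; exact PySem.List.nodup_pyRange_one _ _
  have hmemE_fst : ∀ p ∈ E, 0 ≤ p.1 ∧ p.1 < (data.length : Int) := by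
    intro p hp
    obtain ⟨k, hk, rfl⟩ := (PySem.List.mem_enumerate_iff _ _ _).mp hp
    constructor
    · simp
    · simp only [hdslen] at hk ⊢
      omega
  have hks_sub : ∀ x ∈ ks, x ∈ pts.keys := by
    intro x hx
    obtain ⟨p, hp, rfl⟩ := List.mem_map.mp hx
    have hpE : p ∈ E := hperm.mem_iff.mp (List.mem_reverse.mp (List.mem_of_mem_filter hp))
    obtain ⟨h0, h1⟩ := hmemE_fst p hpE
    rw [hkeys_pts]
    exact PySem.List.mem_pyRange_one.mpr ⟨h0, h1⟩
  have hkeysD : ((ks.foldl (fun d x => d.modify x 0 (· + 1)) pts)).keys = pts.keys := by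
    rw [PySem.Dict.keys_foldl_modify ks 0 (fun _ _ => (· + 1)) pts]
    rw [PySem.Set.update_eq_append_filter]
    rw [List.filter_eq_nil_iff.mpr, List.append_nil]
    intro y hy
    have hyks : y ∈ ks := (PySem.Set.mem_ofList _ _).mp hy
    simp [hks_sub y hyks]
  have hnodupD : ((ks.foldl (fun d x => d.modify x 0 (· + 1)) pts)).keys.Nodup := by
    rw [hkeysD]; exact hnodupK
  -- nodup of ks
  have hnodupks : ks.Nodup := by
    have h1 : (E.map (fun p => p.1)).Nodup := by
      rw [PySem.List.map_fst_enumerate]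
      exact PySem.List.nodup_pyRange_one _ _
    have h2 : (pairs.map (fun p => p.1)).Nodup := ((hperm.map (fun p => p.1)).nodup_iff).mpr h1
    have h3 : (pairs.reverse.map (fun p => p.1)).Nodup := by
      rw [List.map_reverse, List.nodup_reverse]; exact h2
    have h4 : sel.Sublist pairs.reverse := List.filter_sublist
    rw [hks]
    exact (h4.map (fun p => p.1)).nodup h3
  -- items of result
  rw [PySem.Dict.items_eq_map_keys _ hnodupD 0, hkeysD, hkeys_pts]
  -- rhs
  simp only [pvStepB, ← hds, hmx, Option.getD_some]
  rw [PySem.List.enumerate_eq_map_pyRange _ 0]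
  have hlen' : PySem.List.len (List.zipWith (fun p d => if d = mx then p + 1 else p) l ds) = (data.length : Int) := by
    simp [PySem.List.len, hlen, hdslen]
  rw [hlen']
  apply List.map_congr_left
  intro j hj
  obtain ⟨hj0, hj1⟩ := PySem.List.mem_pyRange_one.mp hj
  have hjn : j.toNat < data.length := by omega
  have hjds : j.toNat < ds.length := by omega
  have hjl : j.toNat < l.length := by omega
  -- lhs value
  have hgetD := PySem.Dict.getD_foldl_modify_add_one ks pts j
  have hptsj : pts.getD j 0 = l[j.toNat] := by
    apply PySem.Dict.getD_of_mem_items pts _ hnodupK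
    rw [hrel]
    exact (PySem.List.mem_enumerate_iff _ _ _).mpr ⟨j.toNat, hjl, by simp; omega⟩
  -- membership characterization
  have hiff : j ∈ ks ↔ ds[j.toNat] = mx := by
    constructor
    · intro hx
      obtain ⟨p, hp, hp1⟩ := List.mem_map.mp hx
      have hpE : p ∈ E := hperm.mem_iff.mp (List.mem_reverse.mp (List.mem_of_mem_filter hp))
      obtain ⟨k, hk, rfl⟩ := (PySem.List.mem_enumerate_iff _ _ _).mp hpE
      have hkj : k = j.toNat := by simp at hp1; omega
      have hpv : mx = ds[k] := by
        have := List.of_mem_filter hp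
        simpa using this
      subst hkj
      exact hpv.symm
    · intro hv
      apply List.mem_map.mpr
      refine ⟨(j, ds[j.toNat]), ?_, rfl⟩
      apply List.mem_filter.mpr
      refine ⟨?_, by simp [hv]⟩
      rw [List.mem_reverse]
      apply hperm.mem_iff.mpr
      exact (PySem.List.mem_enumerate_iff _ _ _).mpr ⟨j.toNat, hjds, by simp; omega⟩
  -- rhs value
  have hrhs : PySem.List.pyGetD (List.zipWith (fun p d => if d = mx then p + 1 else p) l ds) j 0
      = if ds[j.toNat] = mx then l[j.toNat] + 1 else l[j.toNat] := by
    rw [PySem.List.pyGetD_eq_getElem _ 0 hj0 (by simp [hlen, hdslen]; omega)]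
    rw [List.getElem_zipWith]
  rw [hgetD, hptsj, hrhs]
  by_cases hcase : ds[j.toNat] = mx
  · rw [if_pos hcase]
    have : ks.count j = 1 := List.count_eq_one_of_mem hnodupks (hiff.mpr hcase)
    rw [this]
    norm_num
  · rw [if_neg hcase]
    have : ks.count j = 0 := by
      rw [List.count_eq_zero]
      intro hmem
      exact hcase (hiff.mp hmem)
    rw [this]
    norm_num


theorem pv_stepB_length (data : List (List Int)) (l : List Int) (t : Int)
    (h : l.length = data.length) : (pvStepB data l t).length = data.length := by
  simp [pvStepB, h]

theorem pv_fold_items (data : List (List Int)) (hne : data ≠ []) :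
    ∀ (ts : List Int) (pts : PySem.Dict Int Int) (l : List Int),
    pts.items = PySem.List.enumerate l 0 → l.length = data.length →
    (ts.foldl (pvStepA data) pts).items = PySem.List.enumerate (ts.foldl (pvStepB data) l) 0
    ∧ (ts.foldl (pvStepB data) l).length = data.length := by
  intro ts
  induction ts with
  | nil => intro pts l h1 h2; exact ⟨h1, h2⟩
  | cons t ts ih =>
    intro pts l h1 h2
    simp only [List.foldl_cons]
    exact ih _ _ (pv_step_items data hne t pts l h1 h2) (pv_stepB_length data l t h2)

theorem pv_init_items (n : Nat) :
    ((PySem.List.pyRange 0 (n : Int) 1).foldl (fun d i => d.insert i 0) PySem.Dict.empty).items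
      = PySem.List.enumerate (List.replicate n (0 : Int)) 0 := by
  rw [PySem.Dict.items_foldl_insert_fresh _ (fun a => a) (fun _ => (0:Int)) _
        (fun a _ => PySem.Dict.contains_empty a)
        (by simpa using PySem.List.nodup_pyRange_one 0 (n:Int))]
  rw [PySem.List.enumerate_eq_map_pyRange _ 0]
  show [] ++ _ = _
  rw [List.nil_append]
  have hlen : PySem.List.len (List.replicate n (0:Int)) = (n : Int) := by simp [PySem.List.len]
  rw [hlen]
  apply List.map_congr_left
  intro j hj
  obtain ⟨hj0, hj1⟩ := PySem.List.mem_pyRange_one.mp hj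
  rw [PySem.List.pyGetD_eq_getElem _ 0 hj0 (by simp; omega)]
  simp

theorem pv_final (pts : PySem.Dict Int Int) (l : List Int) (hne : l ≠ [])
    (hrel : pts.items = PySem.List.enumerate l 0) :
    ((PySem.List.pyGet? ((PySem.List.sorted pts.items (fun p => p.2) false).map (fun p => p.2)) (-1))).getD 0
      = (PySem.List.max? l (fun x => x)).getD 0 := by
  obtain ⟨mx, hmx⟩ : ∃ mx, PySem.List.max? l (fun x => x) = some mx := by
    rcases h : PySem.List.max? l (fun x => x) with _ | mx
    · exact absurd ((PySem.List.max?_eq_none_iff _ _).mp h) hne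
    · exact ⟨mx, rfl⟩
  have hEne : PySem.List.enumerate l 0 ≠ [] := by
    intro h
    have hl0 : l.length = 0 := by simpa using congrArg List.length h
    exact hne (List.length_eq_zero_iff.mp hl0)
  obtain ⟨L, hLget, hLmem, hLub⟩ := pv_last_sorted (PySem.List.enumerate l 0) hEne
  rw [hrel, PySem.List.pyGet?_neg_one, List.getLast?_map, hLget, hmx]
  have hsnd : ∀ p ∈ PySem.List.enumerate l 0, p.2 ∈ l := by
    intro p hp
    obtain ⟨k, hk, rfl⟩ := (PySem.List.mem_enumerate_iff _ _ _).mp hp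
    exact List.getElem_mem hk
  have hLm : L.2 = mx := by
    apply le_antisymm (PySem.List.max?_isMax hmx _ (hsnd _ hLmem))
    obtain ⟨k, hk, hkv⟩ := List.mem_iff_getElem.mp (PySem.List.max?_mem hmx)
    exact hLub _ ((PySem.List.mem_enumerate_iff l 0 _).mpr ⟨k, hk, by rw [hkv]⟩)
  simp [hLm]

theorem winnerPoints_eq_alt (data : List (List Int)) (targetSec : Int)
    (hne : data ≠ []) : winnerPoints data targetSec = winnerPoints_alt data targetSec := by
  unfold winnerPoints winnerPoints_alt
  simp only []
  obtain ⟨hitems, hlen⟩ := pv_fold_items data hne (PySem.List.pyRange 1 (targetSec + 1) 1)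
      _ _ (pv_init_items data.length) (by simp)
  have hlne : (PySem.List.pyRange 1 (targetSec + 1) 1).foldl (pvStepB data)
      (List.replicate data.length (0 : Int)) ≠ [] := by
    intro h
    have : data.length = 0 := by rw [← hlen, h]; rfl
    exact hne (List.length_eq_zero_iff.mp this)
  exact pv_final _ _ hlne hitems

-- ===== VERDICT (by name: the statement is the Claim_ definition above) =====
theorem winnerPoints_spec : Claim_equal_winnerPoints := by
  intro data targetSec _ hpre
  unfold Spec_winnerPoints
  exact winnerPoints_eq_alt data targetSec hpre.1
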